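-- pv_equiv track=rewrite | github.com/rocky-mtn-high/DynamicProgrammingProj | algo.py | max_wood_bu
-- ===== SOURCE A (Python) =====
-- def max_wood_bu(segments):
--     n = len(segments)
--     dp = [[0] * n for _ in range(n)]
--
--     for i in range(n):
--         dp[i][i] = segments[i]
--
--     for length in range(2, n + 1):
--         for i in range(n - length + 1):
--             j = i + length - 1
--             total_left = sum(segments[i:j+1])
--             dp[i][j] = total_left - min(dp[i + 1][j], dp[i][j - 1])
--
--     return dp[0][n - 1]
-- ===== SOURCE B (Python) =====
-- def max_wood_bu(segments):
--     n = len(segments)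
--     pref = [0] * (n + 1)
--     for i in range(n):
--         pref[i + 1] = pref[i] + segments[i]
--     prev = segments[:]  # dp diagonal for length 1
--     for length in range(2, n + 1):
--         prev = [pref[i + length] - pref[i] - min(prev[i + 1], prev[i])
--                 for i in range(n - length + 1)]
--     return prev[0]
-- ===== Notes on version B (the rewrite author's own statement) =====
-- stated objective: faster
-- what changed: Replaces the O(n^2) full DP table with inner O(n) range sums by a one-pass prefix-sum array plus a rolling 1D diagonal (only the previous length's values are kept), giving O(n^2) instead of O(n^3).
import Mathlib
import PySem

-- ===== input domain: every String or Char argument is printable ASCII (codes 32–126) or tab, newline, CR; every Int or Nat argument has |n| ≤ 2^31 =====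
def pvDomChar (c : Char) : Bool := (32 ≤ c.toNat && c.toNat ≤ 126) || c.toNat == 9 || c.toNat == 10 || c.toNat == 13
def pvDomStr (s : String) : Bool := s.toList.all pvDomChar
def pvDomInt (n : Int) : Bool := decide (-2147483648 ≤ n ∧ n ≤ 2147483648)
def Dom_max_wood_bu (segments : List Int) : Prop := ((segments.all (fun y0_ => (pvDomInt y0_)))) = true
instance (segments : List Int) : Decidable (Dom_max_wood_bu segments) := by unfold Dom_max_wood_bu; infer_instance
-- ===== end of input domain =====

-- B replaces A's O(n^3) DP (full table, inner range sums) by prefix sums and a rolling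
-- 1D diagonal, an asymptotically faster O(n^2) algorithm with the same return value.

-- ===== PORT A =====
-- dp[i][j] read/write on the 2D list (getD/set; all indices A uses are in range)
def pvGet2 (dp : List (List Int)) (i j : Nat) : Int := (dp.getD i []).getD j 0
def pvSet2 (dp : List (List Int)) (i j : Nat) (v : Int) : List (List Int) :=
  dp.set i ((dp.getD i []).set j v)

def max_wood_bu (segments : List Int) : Int :=
  let n := segments.length
  let dp0 := List.replicate n (List.replicate n (0 : Int))
  let dp1 := (List.range n).foldl (fun dp i => pvSet2 dp i i (segments.getD i 0)) dp0
  let dp2 := (List.range' 2 (n - 1)).foldl (fun dp length =>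
      (List.range (n - length + 1)).foldl (fun dp i =>
        let j := i + length - 1
        let total_left := (PySem.List.slice segments (some (i : Int)) (some ((j : Int) + 1))).sum
        pvSet2 dp i j (total_left - min (pvGet2 dp (i + 1) j) (pvGet2 dp i (j - 1)))) dp) dp1
  pvGet2 dp2 0 (n - 1)

-- ===== PORT B =====
def max_wood_bu_alt (segments : List Int) : Int :=
  let n := segments.length
  let pref := (List.range n).foldl (fun p i => p.set (i + 1) (p.getD i 0 + segments.getD i 0))
      (List.replicate (n + 1) (0 : Int))
  let prev := (List.range' 2 (n - 1)).foldl (fun prev length =>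
      (List.range (n - length + 1)).map (fun i =>
        pref.getD (i + length) 0 - pref.getD i 0 - min (prev.getD (i + 1) 0) (prev.getD i 0)))
      segments
  prev.getD 0 0

-- ===== PRECONDITION & SPEC =====
-- Pre_ excludes only the empty list, on which Python A raises IndexError (dp[0] of an empty dp).
def Pre_max_wood_bu (segments : List Int) : Prop := segments ≠ []
instance (segments : List Int) : Decidable (Pre_max_wood_bu segments) := by
  unfold Pre_max_wood_bu; infer_instance

def pvWitness_max_wood_bu : List Int := [3, 1, 5]

def Spec_max_wood_bu (segments : List Int) (out : Int) : Prop := out = max_wood_bu_alt segments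
instance (segments : List Int) (out : Int) : Decidable (Spec_max_wood_bu segments out) := by
  unfold Spec_max_wood_bu; infer_instance

-- ===== CLAIM (what is proved, stated in full; the proofs are below) =====
def Claim_equal_max_wood_bu : Prop := ∀ (segments : List Int), Dom_max_wood_bu segments →
  Pre_max_wood_bu segments → Spec_max_wood_bu segments (max_wood_bu segments)

-- ===== LEMMAS AND PROOFS =====

def pvShape (dp : List (List Int)) (n : Nat) : Prop :=
  dp.length = n ∧ ∀ r ∈ dp, r.length = n

theorem pvShape_row {dp : List (List Int)} {n i : Nat} (h : pvShape dp n) (hi : i < n) :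
    (dp.getD i []).length = n := by
  obtain ⟨hl, hr⟩ := h
  have hi' : i < dp.length := by omega
  rw [List.getD_eq_getElem _ _ hi']
  exact hr _ (List.getElem_mem hi')

theorem pvShape_pvSet2 {dp : List (List Int)} {n : Nat} (h : pvShape dp n) (i j : Nat) (v : Int) :
    pvShape (pvSet2 dp i j v) n := by
  obtain ⟨hl, hr⟩ := h
  refine ⟨by simp [pvSet2, hl], ?_⟩
  intro r hrmem
  by_cases hi : i < dp.length
  · rcases List.mem_or_eq_of_mem_set hrmem with hmem | rfl
    · exact hr _ hmem
    · rw [List.length_set, List.getD_eq_getElem _ _ hi]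
      exact hr _ (List.getElem_mem hi)
  · rw [pvSet2, List.set_eq_of_length_le (by omega)] at hrmem
    exact hr _ hrmem

theorem pvGet2_pvSet2_ne (dp : List (List Int)) (i j : Nat) (v : Int) (p q : Nat)
    (h : ¬(p = i ∧ q = j)) : pvGet2 (pvSet2 dp i j v) p q = pvGet2 dp p q := by
  unfold pvGet2 pvSet2
  simp only [List.getD]
  by_cases hp : p = i
  · subst hp
    have hq : q ≠ j := fun hq => h ⟨rfl, hq⟩
    by_cases hlt : p < dp.length
    · rw [List.getElem?_set_self hlt]
      simp only [Option.getD_some]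
      rw [List.getElem?_set_ne (Ne.symm hq)]
    · rw [List.set_eq_of_length_le (by omega)]
  · rw [List.getElem?_set_ne (fun he => hp he.symm)]

theorem pvGet2_pvSet2_self (dp : List (List Int)) (i j : Nat) (v : Int)
    (hi : i < dp.length) (hj : j < (dp.getD i []).length) :
    pvGet2 (pvSet2 dp i j v) i j = v := by
  unfold pvGet2 pvSet2
  simp only [List.getD]
  rw [List.getElem?_set_self hi]
  simp only [Option.getD_some]
  have hj' : j < ((dp[i]?.getD []).length) := hj
  rw [List.getElem?_set_self hj']
  simp

theorem init_fold (s : List Int) (n : Nat) (is : List Nat) (dp : List (List Int))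
    (hs : pvShape dp n) (hlt : ∀ i ∈ is, i < n) (hnd : is.Nodup) :
    pvShape (is.foldl (fun dp i => pvSet2 dp i i (s.getD i 0)) dp) n ∧
    (∀ p q : Nat, (p ∈ is → q ≠ p) →
      pvGet2 (is.foldl (fun dp i => pvSet2 dp i i (s.getD i 0)) dp) p q = pvGet2 dp p q) ∧
    (∀ i ∈ is, pvGet2 (is.foldl (fun dp i => pvSet2 dp i i (s.getD i 0)) dp) i i = s.getD i 0) := by
  induction is generalizing dp with
  | nil => exact ⟨hs, fun _ _ _ => rfl, by simp⟩
  | cons i0 rest ih =>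
    have hi0 : i0 < n := hlt i0 (by simp)
    have hs1 : pvShape (pvSet2 dp i0 i0 (s.getD i0 0)) n := pvShape_pvSet2 hs i0 i0 _
    have hnd' := (List.nodup_cons.mp hnd)
    obtain ⟨ihS, ihP, ihV⟩ := ih (pvSet2 dp i0 i0 (s.getD i0 0)) hs1
      (fun i hi => hlt i (by simp [hi])) hnd'.2
    refine ⟨ihS, ?_, ?_⟩
    · intro p q hpq
      simp only [List.foldl_cons]
      rw [ihP p q (fun hp => hpq (by simp [hp]))]
      exact pvGet2_pvSet2_ne dp i0 i0 _ p q (by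
        rintro ⟨rfl, rfl⟩
        exact hpq (by simp) rfl)
    · intro i hi
      simp only [List.foldl_cons]
      rcases List.mem_cons.mp hi with rfl | hi'
      · rw [ihP i i (fun hp => absurd hp hnd'.1)]
        exact pvGet2_pvSet2_self dp i i _ (by have := hs.1; omega) (by rw [pvShape_row hs (by omega : i < n)]; omega)
      · exact ihV i hi'

theorem inner_fold (n d : Nat) (t : Nat → Int) (is : List Nat) (dp : List (List Int))
    (hs : pvShape dp n) (hlt : ∀ i ∈ is, i + d + 2 ≤ n) (hnd : is.Nodup) :
    pvShape (is.foldl (fun dp i => pvSet2 dp i (i + d + 1)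
        (t i - min (pvGet2 dp (i + 1) (i + d + 1)) (pvGet2 dp i (i + d)))) dp) n ∧
    (∀ p q : Nat, (p ∈ is → q ≠ p + d + 1) →
      pvGet2 (is.foldl (fun dp i => pvSet2 dp i (i + d + 1)
        (t i - min (pvGet2 dp (i + 1) (i + d + 1)) (pvGet2 dp i (i + d)))) dp) p q = pvGet2 dp p q) ∧
    (∀ i ∈ is, pvGet2 (is.foldl (fun dp i => pvSet2 dp i (i + d + 1)
        (t i - min (pvGet2 dp (i + 1) (i + d + 1)) (pvGet2 dp i (i + d)))) dp) i (i + d + 1) =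
      t i - min (pvGet2 dp (i + 1) (i + d + 1)) (pvGet2 dp i (i + d))) := by
  induction is generalizing dp with
  | nil => exact ⟨hs, fun _ _ _ => rfl, by simp⟩
  | cons i0 rest ih =>
    have hi0 : i0 + d + 2 ≤ n := hlt i0 (by simp)
    set v0 : Int := t i0 - min (pvGet2 dp (i0 + 1) (i0 + d + 1)) (pvGet2 dp i0 (i0 + d)) with hv0
    have hs1 : pvShape (pvSet2 dp i0 (i0 + d + 1) v0) n := pvShape_pvSet2 hs _ _ _
    have hnd' := List.nodup_cons.mp hnd
    obtain ⟨ihS, ihP, ihV⟩ := ih (pvSet2 dp i0 (i0 + d + 1) v0) hs1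
      (fun i hi => hlt i (by simp [hi])) hnd'.2
    refine ⟨ihS, ?_, ?_⟩
    · intro p q hpq
      simp only [List.foldl_cons]
      rw [ihP p q (fun hp => hpq (by simp [hp]))]
      exact pvGet2_pvSet2_ne dp i0 (i0 + d + 1) _ p q (by
        rintro ⟨rfl, rfl⟩
        exact hpq (by simp) rfl)
    · intro i hi
      simp only [List.foldl_cons]
      rcases List.mem_cons.mp hi with rfl | hi'
      · rw [ihP i (i + d + 1) (fun hp => absurd hp hnd'.1)]
        exact pvGet2_pvSet2_self dp i (i + d + 1) _ (by have := hs.1; omega)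
          (by rw [pvShape_row hs (by omega : i < n)]; omega)
      · rw [ihV i hi',
          pvGet2_pvSet2_ne dp i0 (i0 + d + 1) _ (i + 1) (i + d + 1) (by omega),
          pvGet2_pvSet2_ne dp i0 (i0 + d + 1) _ i (i + d) (by omega)]

theorem pref_build (s : List Int) (m : Nat) (hm : m ≤ s.length) :
    ((List.range m).foldl (fun p i => p.set (i + 1) (p.getD i 0 + s.getD i 0))
        (List.replicate (s.length + 1) (0 : Int))).length = s.length + 1 ∧
    ∀ k ≤ m, ((List.range m).foldl (fun p i => p.set (i + 1) (p.getD i 0 + s.getD i 0))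
        (List.replicate (s.length + 1) (0 : Int))).getD k 0 = (s.take k).sum := by
  induction m with
  | zero =>
    refine ⟨by simp, ?_⟩
    intro k hk
    interval_cases k
    simp [List.getD]
  | succ m ih =>
    obtain ⟨ihL, ihV⟩ := ih (by omega)
    rw [List.range_succ, List.foldl_append, List.foldl_cons, List.foldl_nil]
    set p := (List.range m).foldl (fun p i => p.set (i + 1) (p.getD i 0 + s.getD i 0))
        (List.replicate (s.length + 1) (0 : Int)) with hp
    refine ⟨by simp [ihL], ?_⟩
    intro k hk
    by_cases hkm : k = m + 1
    · subst hkm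
      rw [List.getD_eq_getElem _ _ (by simp only [List.length_set, ihL]; omega),
        List.getElem_set_self (by simp [ihL]; omega)]
      rw [ihV m (le_refl m), List.getD_eq_getElem _ _ (by omega),
        List.sum_take_succ _ _ (by omega)]
    · rw [List.getD, List.getElem?_set_ne (by omega : m + 1 ≠ k), ← List.getD]
      exact ihV k (by omega)

theorem outer_inv (s : List Int) (m : Nat) (hm : m ≤ s.length - 1) (hne : s ≠ []) :
    pvShape ((List.range' 2 m).foldl (fun dp length =>
        (List.range (s.length - length + 1)).foldl (fun dp i =>
          let j := i + length - 1
          let total_left := (PySem.List.slice s (some (i : Int)) (some ((j : Int) + 1))).sum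
          pvSet2 dp i j (total_left - min (pvGet2 dp (i + 1) j) (pvGet2 dp i (j - 1)))) dp)
        ((List.range s.length).foldl (fun dp i => pvSet2 dp i i (s.getD i 0))
          (List.replicate s.length (List.replicate s.length (0 : Int))))) s.length ∧
    ∀ i : Nat, i + m + 1 ≤ s.length →
      pvGet2 ((List.range' 2 m).foldl (fun dp length =>
        (List.range (s.length - length + 1)).foldl (fun dp i =>
          let j := i + length - 1
          let total_left := (PySem.List.slice s (some (i : Int)) (some ((j : Int) + 1))).sum
          pvSet2 dp i j (total_left - min (pvGet2 dp (i + 1) j) (pvGet2 dp i (j - 1)))) dp)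
        ((List.range s.length).foldl (fun dp i => pvSet2 dp i i (s.getD i 0))
          (List.replicate s.length (List.replicate s.length (0 : Int))))) i (i + m) =
      ((List.range' 2 m).foldl (fun prev length =>
        (List.range (s.length - length + 1)).map (fun i =>
          ((List.range s.length).foldl (fun p i => p.set (i + 1) (p.getD i 0 + s.getD i 0))
            (List.replicate (s.length + 1) (0 : Int))).getD (i + length) 0 -
          ((List.range s.length).foldl (fun p i => p.set (i + 1) (p.getD i 0 + s.getD i 0))
            (List.replicate (s.length + 1) (0 : Int))).getD i 0 -
          min (prev.getD (i + 1) 0) (prev.getD i 0))) s).getD i 0 := by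
  have hn : 1 ≤ s.length := List.length_pos_iff.mpr hne
  have hrep : pvShape (List.replicate s.length (List.replicate s.length (0 : Int))) s.length := by
    refine ⟨by simp, ?_⟩
    intro r hr
    rw [List.eq_of_mem_replicate hr]
    simp
  obtain ⟨initS, _, initV⟩ := init_fold s s.length (List.range s.length)
    (List.replicate s.length (List.replicate s.length (0 : Int))) hrep
    (fun i hi => by simpa using hi) (List.nodup_range)
  induction m with
  | zero =>
    simp only [List.range'_zero, List.foldl_nil]
    refine ⟨initS, ?_⟩
    intro i hi
    simpa using initV i (by simp; omega)
  | succ m ih =>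
    obtain ⟨ihS, ihV⟩ := ih (by omega)
    rw [List.range'_1_concat, List.foldl_append, List.foldl_append,
      List.foldl_cons, List.foldl_cons, List.foldl_nil, List.foldl_nil]
    set dpm := ((List.range' 2 m).foldl (fun dp length =>
        (List.range (s.length - length + 1)).foldl (fun dp i =>
          let j := i + length - 1
          let total_left := (PySem.List.slice s (some (i : Int)) (some ((j : Int) + 1))).sum
          pvSet2 dp i j (total_left - min (pvGet2 dp (i + 1) j) (pvGet2 dp i (j - 1)))) dp)
        ((List.range s.length).foldl (fun dp i => pvSet2 dp i i (s.getD i 0))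
          (List.replicate s.length (List.replicate s.length (0 : Int))))) with hdpm
    set prevm := ((List.range' 2 m).foldl (fun prev length =>
        (List.range (s.length - length + 1)).map (fun i =>
          ((List.range s.length).foldl (fun p i => p.set (i + 1) (p.getD i 0 + s.getD i 0))
            (List.replicate (s.length + 1) (0 : Int))).getD (i + length) 0 -
          ((List.range s.length).foldl (fun p i => p.set (i + 1) (p.getD i 0 + s.getD i 0))
            (List.replicate (s.length + 1) (0 : Int))).getD i 0 -
          min (prev.getD (i + 1) 0) (prev.getD i 0))) s) with hprevm
    have hbody : (fun (dp : List (List Int)) (i : Nat) =>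
          let j := i + (2 + m) - 1
          let total_left := (PySem.List.slice s (some (i : Int)) (some ((j : Int) + 1))).sum
          pvSet2 dp i j (total_left - min (pvGet2 dp (i + 1) j) (pvGet2 dp i (j - 1)))) =
        (fun (dp : List (List Int)) (i : Nat) => pvSet2 dp i (i + m + 1)
          ((PySem.List.slice s (some (i : Int)) (some (((i + m + 1 : Nat) : Int) + 1))).sum -
            min (pvGet2 dp (i + 1) (i + m + 1)) (pvGet2 dp i (i + m)))) := by
      funext dp i
      have e1 : i + (2 + m) - 1 = i + m + 1 := by omega
      have e2 : i + m + 1 - 1 = i + m := by omega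
      simp only [e1, e2]
    rw [hbody]
    obtain ⟨finS, _, finV⟩ := inner_fold s.length m
      (fun i => (PySem.List.slice s (some (i : Int)) (some (((i + m + 1 : Nat) : Int) + 1))).sum)
      (List.range (s.length - (2 + m) + 1)) dpm ihS
      (fun i hi => by simp at hi; omega) (List.nodup_range)
    refine ⟨finS, ?_⟩
    intro i hi
    have hiR : i ∈ List.range (s.length - (2 + m) + 1) := by simp; omega
    have e3 : i + (m + 1) = i + m + 1 := by omega
    rw [e3, finV i hiR]
    -- right-hand side: entry i of the mapped range
    rw [List.getD_eq_getElem _ _ (by rw [List.length_map, List.length_range]; omega)]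
    simp only [List.getElem_map, List.getElem_range]
    have r1 : pvGet2 dpm (i + 1) (i + m + 1) = prevm.getD (i + 1) 0 := by
      have := ihV (i + 1) (by omega)
      rw [show i + 1 + m = i + m + 1 by omega] at this
      exact this
    have r2 : pvGet2 dpm i (i + m) = prevm.getD i 0 := ihV i (by omega)
    rw [r1, r2]
    -- it remains to identify the slice sum with the prefix-sum difference
    obtain ⟨_, prefV⟩ := pref_build s s.length le_rfl
    rw [prefV (i + (2 + m)) (by omega), prefV i (by omega)]
    rw [show (((i + m + 1 : Nat) : Int) + 1) = ((i + m + 2 : Nat) : Int) by push_cast; ring]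
    rw [PySem.List.slice_natCast]
    rw [show i + m + 2 - i = m + 2 by omega]
    have hsum : (List.take (i + (2 + m)) s).sum =
        (List.take i s).sum + (List.take (m + 2) (List.drop i s)).sum := by
      rw [show i + (2 + m) = i + (m + 2) by omega, List.take_add, List.sum_append]
    rw [hsum]
    ring

-- ===== VERDICT (by name: the statement is the Claim_ definition above) =====
theorem max_wood_bu_spec : Claim_equal_max_wood_bu := by
  intro s _ hne
  unfold Spec_max_wood_bu max_wood_bu max_wood_bu_alt
  have hn : 1 ≤ s.length := List.length_pos_iff.mpr hne
  have h := (outer_inv s (s.length - 1) le_rfl hne).2 0 (by omega)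
  simpa using h
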